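-- pv_equiv track=rewrite | github.com/nghiaduong-dz/OS_VME_08_GROUP5 | CODE/algorithms/opt.py | _build_next_use
-- ===== SOURCE A (Python) =====
-- def _build_next_use(refs: list[int]) -> list[dict[int, int]]:
--     """
--     Xây dựng bảng next_use[i] → dict {page: next_index_after_i}.
--
--     Độ phức tạp: O(n)
--         - Quét refs từ cuối → đầu, cập nhật dict hiện tại.
--         - Mỗi bước i, dict lưu lần dùng tiếp theo của mọi page
--           từ vị trí i+1 trở đi.
--
--     Trả về: list có len = len(refs)+1
--         next_use[i] = next use AFTER step i
--         Nếu page không xuất hiện nữa → không có trong dict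
--           (coi như ∞ khi evict).
--     """
--     n          = len(refs)
--     next_use   : list[dict[int, int]] = [dict() for _ in range(n + 1)]
--     # next_use[n] = {} (không còn bước nào sau bước cuối)
--
--     for i in range(n - 1, -1, -1):
--         # Kế thừa từ bước sau
--         next_use[i] = dict(next_use[i + 1])
--         # Bước i+1 trở đi: page refs[i] xuất hiện tại i
--         # Nhưng ta muốn next_use[i] = "sau bước i", nên:
--         # refs[i] sẽ được dùng tại i, nên next_use sau bước i-1
--         # Cách dễ hơn: next_use[i] là dict "nhìn từ bước i+1 trở đi"
--         # Gán sau khi copy: refs[i] xuất hiện tại i → ghi vào [i-1..0]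
--         next_use[i][refs[i]] = i   # tại bước i, page này sẽ dùng
--
--     # Sửa lại: next_use[i] nên = "lần dùng tiếp theo SAU bước i"
--     # Rebuild đúng chiều
--     result: list[dict[int, int]] = [dict() for _ in range(n + 1)]
--     future: dict[int, int]       = {}   # page → next index từ cuối
--
--     for i in range(n - 1, -1, -1):
--         future[refs[i]] = i             # page refs[i] sẽ dùng tại i
--         result[i]       = dict(future)  # bước i nhìn về tương lai từ i
--
--     return result   # result[i] = next use TẠI hoặc SAU bước i
-- ===== SOURCE B (Python) =====
-- def _build_next_use(refs: list[int]) -> list[dict[int, int]]: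
--     """For each step i, scan the remaining references backwards so that
--     overwrites leave each page's nearest upcoming use; row n is empty."""
--     n = len(refs)
--     table: list[dict[int, int]] = []
--     for i in range(n + 1):
--         upcoming: dict[int, int] = {}
--         for j in range(n - 1, i - 1, -1):
--             upcoming[refs[j]] = j
--         table.append(upcoming)
--     return table
-- ===== Notes on version B (the rewrite author's own statement) =====
-- stated objective: simpler
-- what changed: A makes two backward passes that thread and repeatedly copy a shared 'future' dict (the first pass being dead code); B computes each row independently by a plain backward scan of the remaining references, with no shared state between rows.
import Mathlib
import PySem

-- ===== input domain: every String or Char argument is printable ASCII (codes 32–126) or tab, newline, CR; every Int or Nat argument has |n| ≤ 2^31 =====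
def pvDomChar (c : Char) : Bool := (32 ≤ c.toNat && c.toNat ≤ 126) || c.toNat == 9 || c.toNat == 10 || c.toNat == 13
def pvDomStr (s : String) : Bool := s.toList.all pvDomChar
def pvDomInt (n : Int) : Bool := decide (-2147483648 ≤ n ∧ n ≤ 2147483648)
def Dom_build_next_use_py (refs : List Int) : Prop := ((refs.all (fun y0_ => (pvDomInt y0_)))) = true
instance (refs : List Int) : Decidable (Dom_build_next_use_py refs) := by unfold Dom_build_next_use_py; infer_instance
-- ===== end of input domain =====

-- B computes each next-use row independently by a plain backward scan of the remaining
-- references instead of A's two backward passes threading a shared, repeatedly copied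
-- 'future' dict (one of them dead code); objective: simpler, same exact output.

-- ===== PORT A =====
-- Literal transliteration of A. Indices i always satisfy 0 ≤ i < len(refs), so the
-- pyGetD/pySetD defaults are never reached. A's first loop builds next_use and never
-- uses it (dead code in A) — ported literally all the same as the unused _next_use.

def build_next_use_py (refs : List Int) : List (List (Int × Int)) :=
  let n : Int := PySem.List.len refs
  let next_use0 : List (PySem.Dict Int Int) :=
    (PySem.List.pyRange 0 (n + 1) 1).map (fun _ => PySem.Dict.empty)
  let _next_use := (PySem.List.pyRange (n - 1) (-1) (-1)).foldl
    (fun nu i =>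
      PySem.List.pySetD nu i
        ((PySem.List.pyGetD nu (i + 1) PySem.Dict.empty).insert (PySem.List.pyGetD refs i 0) i))
    next_use0
  let result0 : List (PySem.Dict Int Int) :=
    (PySem.List.pyRange 0 (n + 1) 1).map (fun _ => PySem.Dict.empty)
  let st := (PySem.List.pyRange (n - 1) (-1) (-1)).foldl
    (fun (st : List (PySem.Dict Int Int) × PySem.Dict Int Int) i =>
      let fut := st.2.insert (PySem.List.pyGetD refs i 0) i
      (PySem.List.pySetD st.1 i fut, fut))
    (result0, PySem.Dict.empty)
  st.1.map (fun d => PySem.Dict.items d)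

-- ===== PORT B =====
-- Literal transliteration of Source B: for each i in range(n+1), an inner backward scan
-- 'for j in range(n-1, i-1, -1): upcoming[refs[j]] = j', appended to the table.
def build_next_use_py_alt (refs : List Int) : List (List (Int × Int)) :=
  let n : Int := PySem.List.len refs
  ((PySem.List.pyRange 0 (n + 1) 1).foldl
    (fun tbl i =>
      tbl ++ [(PySem.List.pyRange (n - 1) (i - 1) (-1)).foldl
        (fun d j => d.insert (PySem.List.pyGetD refs j 0) j)
        (PySem.Dict.empty : PySem.Dict Int Int)])
    []).map (fun d => PySem.Dict.items d)

-- ===== PRECONDITION & SPEC =====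
def Spec_build_next_use_py (refs : List Int) (out : List (List (Int × Int))) : Prop := out = build_next_use_py_alt refs
instance (refs : List Int) (out : List (List (Int × Int))) : Decidable (Spec_build_next_use_py refs out) := by unfold Spec_build_next_use_py; infer_instance

-- ===== CLAIM (what is proved, stated in full; the proofs are below) =====
def Claim_equal_build_next_use_py : Prop := ∀ (refs : List Int), Dom_build_next_use_py refs → Spec_build_next_use_py refs (build_next_use_py refs)

-- ===== LEMMAS AND PROOFS =====
-- pvFut xs i = the dict obtained by inserting xs[m] ↦ i+m for m from the end of xs down to 0
def pvFut : List Int → Int → PySem.Dict Int Int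
  | [], _ => PySem.Dict.empty
  | x :: xs, i => (pvFut xs (i + 1)).insert x i

-- ===== A-side loop =====
def pvResAt (refs : List Int) (k : Nat) : List (PySem.Dict Int Int) :=
  (List.range (refs.length + 1)).map
    (fun j => if k ≤ j ∧ j < refs.length then pvFut (refs.drop j) (j : Int) else PySem.Dict.empty)

theorem pv_resAt_set (refs : List Int) (k : Nat) (hk : k < refs.length) :
    (pvResAt refs (k + 1)).set k (pvFut (refs.drop k) (k : Int)) = pvResAt refs k := by
  unfold pvResAt
  apply List.ext_getElem
  · simp
  · intro j hj hj2
    by_cases hjk : k = j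
    · subst hjk
      simp [List.getElem_map, List.getElem_range, hk]
    · simp only [List.getElem_set, List.getElem_map, List.getElem_range, if_neg hjk]
      have hiff : (k + 1 ≤ j ∧ j < refs.length) ↔ (k ≤ j ∧ j < refs.length) := by omega
      by_cases hcond : k + 1 ≤ j ∧ j < refs.length
      · rw [if_pos hcond, if_pos (hiff.mp hcond)]
      · rw [if_neg hcond, if_neg (fun h => hcond (hiff.mpr h))]

theorem pv_fut_step (refs : List Int) (k : Nat) (hk : k < refs.length) :
    (pvFut (refs.drop (k + 1)) ((k + 1 : Nat) : Int)).insert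
      (PySem.List.pyGetD refs (k : Int) 0) (k : Int) = pvFut (refs.drop k) (k : Int) := by
  have h1 : PySem.List.pyGetD refs (k : Int) 0 = refs[k] := by
    rw [PySem.List.pyGetD_natCast]
    exact List.getD_eq_getElem refs 0 hk
  rw [List.drop_eq_getElem_cons hk]
  simp only [pvFut]
  push_cast
  rw [h1]

theorem pv_loopA (refs : List Int) :
    ∀ (k : Nat), k ≤ refs.length →
      (PySem.List.pyRange ((k : Int) - 1) (-1) (-1)).foldl
        (fun (st : List (PySem.Dict Int Int) × PySem.Dict Int Int) i =>
          let fut := st.2.insert (PySem.List.pyGetD refs i 0) i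
          (PySem.List.pySetD st.1 i fut, fut))
        (pvResAt refs k, pvFut (refs.drop k) (k : Int))
      = (pvResAt refs 0, pvFut refs 0) := by
  intro k
  induction k with
  | zero =>
    intro _
    rw [PySem.List.pyRange_neg_one_eq_nil (by omega)]
    simp
  | succ k ih =>
    intro hk1
    have hk : k < refs.length := by omega
    have hs : ((k + 1 : Nat) : Int) - 1 = (k : Int) := by push_cast; ring
    rw [hs, PySem.List.pyRange_neg_one_cons (by omega), List.foldl_cons]
    simp only [pv_fut_step refs k hk]
    rw [PySem.List.pySetD_natCast, pv_resAt_set refs k hk]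
    exact ih (by omega)

theorem pv_A_eq (refs : List Int) :
    build_next_use_py refs
      = (List.range (refs.length + 1)).map
          (fun j => if j < refs.length then (pvFut (refs.drop j) (j : Int)).items else []) := by
  have hinit : ((PySem.List.pyRange 0 ((refs.length : Int) + 1) 1).map
      (fun _ => (PySem.Dict.empty : PySem.Dict Int Int))) = pvResAt refs refs.length := by
    have h1 : ((refs.length : Int) + 1) = ((refs.length + 1 : Nat) : Int) := by push_cast; ring
    rw [h1, PySem.List.pyRange_zero_nat]
    unfold pvResAt
    rw [List.map_map]
    apply List.map_congr_left
    intro j hj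
    have h2 : ¬ (refs.length ≤ j ∧ j < refs.length) := by omega
    simp [h2]
  have hfut0 : (PySem.Dict.empty : PySem.Dict Int Int)
      = pvFut (refs.drop refs.length) ((refs.length : Nat) : Int) := by
    rw [List.drop_length]
    rfl
  simp only [build_next_use_py, PySem.List.len_eq]
  rw [hinit, hfut0, pv_loopA refs refs.length (le_refl _)]
  unfold pvResAt
  rw [List.map_map]
  apply List.map_congr_left
  intro j hj
  by_cases h : j < refs.length
  · simp [h]
  · simp [h]
    rfl

-- ===== B-side inner scan =====
theorem pv_rowB (refs : List Int) :
    ∀ (j : Nat), j ≤ refs.length → ∀ (k : Nat), k ≤ j →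
      (PySem.List.pyRange ((j : Int) - 1) ((k : Int) - 1) (-1)).foldl
        (fun d i => d.insert (PySem.List.pyGetD refs i 0) i)
        (pvFut (refs.drop j) (j : Int))
      = pvFut (refs.drop k) (k : Int) := by
  intro j
  induction j with
  | zero =>
    intro _ k hk
    have hk0 : k = 0 := by omega
    subst hk0
    rw [PySem.List.pyRange_neg_one_eq_nil (by omega)]
    rfl
  | succ j ih =>
    intro hj k hk
    by_cases hkj : k = j + 1
    · subst hkj
      rw [PySem.List.pyRange_neg_one_eq_nil (by omega)]
      rfl
    · have hk' : k ≤ j := by omega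
      have hs : ((j + 1 : Nat) : Int) - 1 = (j : Int) := by push_cast; ring
      rw [hs, PySem.List.pyRange_neg_one_cons (by omega), List.foldl_cons]
      have hjlt : j < refs.length := by omega
      rw [show ((j : Int) - 1) = ((j : Nat) : Int) - 1 from rfl]
      rw [pv_fut_step refs j hjlt]
      exact ih (by omega) k hk'

theorem pv_B_eq (refs : List Int) :
    build_next_use_py_alt refs
      = (List.range (refs.length + 1)).map
          (fun i => (pvFut (refs.drop i) (i : Int)).items) := by
  simp only [build_next_use_py_alt, PySem.List.len_eq]
  rw [PySem.List.foldl_append_singleton_eq_map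
    (fun i => (PySem.List.pyRange ((refs.length : Int) - 1) (i - 1) (-1)).foldl
      (fun d j => d.insert (PySem.List.pyGetD refs j 0) j) PySem.Dict.empty)]
  have h1 : ((refs.length : Int) + 1) = ((refs.length + 1 : Nat) : Int) := by push_cast; ring
  rw [h1, PySem.List.pyRange_zero_nat]
  simp only [List.nil_append, List.map_map]
  apply List.map_congr_left
  intro i hi
  have hi' : i ≤ refs.length := by
    have := List.mem_range.mp hi; omega
  have hfut0 : (PySem.Dict.empty : PySem.Dict Int Int)
      = pvFut (refs.drop refs.length) ((refs.length : Nat) : Int) := by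
    rw [List.drop_length]; rfl
  simp only [Function.comp_apply]
  rw [hfut0, pv_rowB refs refs.length (le_refl _) i hi']

theorem pv_main (refs : List Int) : build_next_use_py refs = build_next_use_py_alt refs := by
  rw [pv_A_eq, pv_B_eq]
  apply List.map_congr_left
  intro j hj
  by_cases h : j < refs.length
  · rw [if_pos h]
  · have hje : j = refs.length := by
      have := List.mem_range.mp hj; omega
    subst hje
    rw [if_neg h, List.drop_length]
    rfl

-- ===== VERDICT (by name: the statement is the Claim_ definition above) =====
theorem build_next_use_py_spec : Claim_equal_build_next_use_py := by
  intro refs _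
  unfold Spec_build_next_use_py
  exact pv_main refs
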